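-- pv_equiv track=rewrite | github.com/jack0682/ONN | scripts/train_collatz_binary.py | int_to_binary_tokens
-- ===== SOURCE A (Python) =====
-- ZERO_BIT = 1
--
-- ONE_BIT = 2
--
-- def int_to_binary_tokens(n: int, max_bits: int = 64) -> list:
--     """정수를 이진 토큰 시퀀스로 변환 (LSB first).
--
--     예: 27 = 11011 → [1,1,0,1,1] (LSB first)
--     토큰: 0=PAD, 1=ZERO, 2=ONE
--     """
--     if n == 0:
--         return [ZERO_BIT]
--
--     bits = []
--     while n > 0 and len(bits) < max_bits:
--         bits.append(ONE_BIT if (n & 1) else ZERO_BIT)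
--         n >>= 1
--
--     return bits
-- ===== SOURCE B (Python) =====
-- ZERO_BIT = 1
--
-- ONE_BIT = 2
--
-- def int_to_binary_tokens(n: int, max_bits: int = 64) -> list:
--     if n == 0:
--         return [ZERO_BIT]
--     return _lsb_bits(n, max_bits)
--
-- def _lsb_bits(n: int, k: int) -> list:
--     """LSB-first tokens of the k lowest set positions of a positive n."""
--     if n <= 0 or k <= 0:
--         return []
--     return [ONE_BIT if n & 1 else ZERO_BIT] + _lsb_bits(n >> 1, k - 1)
-- ===== Notes on version B (the rewrite author's own statement) =====
-- stated objective: alternative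
-- what changed: Replaces A's while loop that grows an accumulator list and re-checks its length against max_bits each iteration with a direct recursion over (n, remaining bit budget) that builds the token list front-to-back by cons/concat.
import Mathlib
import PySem

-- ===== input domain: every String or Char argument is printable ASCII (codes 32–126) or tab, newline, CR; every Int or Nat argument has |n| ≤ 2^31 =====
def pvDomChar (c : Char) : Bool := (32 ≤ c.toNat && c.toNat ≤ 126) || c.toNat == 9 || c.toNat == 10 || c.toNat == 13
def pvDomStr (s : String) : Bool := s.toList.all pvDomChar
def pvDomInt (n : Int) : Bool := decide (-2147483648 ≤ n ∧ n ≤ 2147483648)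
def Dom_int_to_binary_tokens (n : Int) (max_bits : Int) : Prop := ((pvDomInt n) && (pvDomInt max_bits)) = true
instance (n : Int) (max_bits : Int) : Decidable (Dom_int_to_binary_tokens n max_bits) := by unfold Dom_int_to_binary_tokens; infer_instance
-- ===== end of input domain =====

-- B replaces A's while loop (growing an accumulator and re-checking its length each
-- iteration) by a direct structural recursion counting the bit budget down
-- (objective: alternative decomposition; return values identical on all inputs).

-- ===== PORT A =====
-- A's while loop: while n > 0 and len(bits) < max_bits: bits.append(...); n >>= 1
def pvLoopA (n : Int) (bits : List Int) (max_bits : Int) : List Int :=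
  if _h : 0 < n ∧ (bits.length : Int) < max_bits then
    pvLoopA (PySem.Int.floordiv n 2)
      (bits ++ [if PySem.Int.mod n 2 ≠ 0 then (2 : Int) else 1]) max_bits
  else bits
termination_by n.toNat
decreasing_by
  have h2 : PySem.Int.floordiv n 2 = n / 2 := PySem.Int.floordiv_eq_ediv_of_pos (by omega)
  rw [h2]; omega

def int_to_binary_tokens (n : Int) (max_bits : Int) : List Int :=
  if n = 0 then [1] else pvLoopA n [] max_bits

-- ===== PORT B =====
-- _lsb_bits of Source B; Python's `n & 1` is n % 2 and `n >> 1` is floor division by 2,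
-- which on Int with the positive divisor 2 coincide with Lean's % and / (Euclidean =
-- floor for a positive divisor), exact here.
def pvLsbBits (n : Int) (k : Int) : List Int :=
  if n ≤ 0 ∨ k ≤ 0 then []
  else (if n % 2 ≠ 0 then (2 : Int) else 1) :: pvLsbBits (n / 2) (k - 1)
termination_by n.toNat
decreasing_by omega

def int_to_binary_tokens_alt (n : Int) (max_bits : Int) : List Int :=
  if n = 0 then [1] else pvLsbBits n max_bits

-- ===== PRECONDITION & SPEC =====
def Spec_int_to_binary_tokens (n : Int) (max_bits : Int) (out : List Int) : Prop := out = int_to_binary_tokens_alt n max_bits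
instance (n : Int) (max_bits : Int) (out : List Int) : Decidable (Spec_int_to_binary_tokens n max_bits out) := by unfold Spec_int_to_binary_tokens; infer_instance

-- ===== CLAIM (what is proved, stated in full; the proofs are below) =====
def Claim_equal_int_to_binary_tokens : Prop := ∀ (n : Int) (max_bits : Int), Dom_int_to_binary_tokens n max_bits → Spec_int_to_binary_tokens n max_bits (int_to_binary_tokens n max_bits)

-- ===== LEMMAS AND PROOFS =====

-- loop invariant: A's accumulator loop produces the accumulator followed by B's
-- recursion on the remaining budget max_bits - len(bits)
lemma pvLoopA_eq (m : Nat) : ∀ (n : Int), n.toNat = m → ∀ (bits : List Int) (max_bits : Int),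
    pvLoopA n bits max_bits = bits ++ pvLsbBits n (max_bits - bits.length) := by
  induction m using Nat.strong_induction_on with
  | _ m ih =>
    intro n hm bits max_bits
    rw [pvLoopA]
    by_cases h : 0 < n ∧ (bits.length : Int) < max_bits
    · obtain ⟨hn, hlen⟩ := h
      have hfd : PySem.Int.floordiv n 2 = n / 2 := PySem.Int.floordiv_eq_ediv_of_pos (by omega)
      have hmd : PySem.Int.mod n 2 = n % 2 := PySem.Int.mod_eq_emod_of_pos (by omega)
      rw [dif_pos ⟨hn, hlen⟩, hfd, ih (n / 2).toNat (by omega) (n / 2) rfl]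
      conv_rhs => rw [pvLsbBits, if_neg (by push_neg; omega)]
      rw [List.append_assoc, List.singleton_append, hmd]
      congr 3
      simp only [List.length_append, List.length_cons, List.length_nil]
      push_cast
      ring
    · rw [dif_neg h]
      rw [pvLsbBits, if_pos (by omega)]
      simp

-- ===== VERDICT (by name: the statement is the Claim_ definition above) =====
theorem int_to_binary_tokens_spec : Claim_equal_int_to_binary_tokens := by
  intro n max_bits _
  unfold Spec_int_to_binary_tokens int_to_binary_tokens int_to_binary_tokens_alt
  by_cases h0 : n = 0
  · simp [h0]
  · rw [if_neg h0, if_neg h0, pvLoopA_eq n.toNat n rfl [] max_bits]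
    simp
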